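-- pv_equiv track=rewrite | github.com/edwardcwang/BAG_framework | bag/layout/routing/fill.py | _fill_symmetric_interval
-- ===== SOURCE A (Python) =====
-- def _fill_symmetric_interval(tot_area, sp, num_diff_sp, sp_edge, blk0, blk1, k, m, mid_blk_len, mid_sp_len,
--                              fill_on_edge, cyclic, offset=0, invert=False):
--     """Helper function, construct interval list from output of _fill_symmetric_info().
--
--     num_diff_sp = number of space blocks that has length different than sp
--     sp_edge = if cyclic and not fill on edge, the edge space length.
--     m = number of half fill blocks.
--     blk1 = length of left-most fill block.
--     blk0 = the second possible fill block length.
--     k = number of half fill blocks with length = blk1.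
--     mid_blk_len = if > 0, length of middle fill block.  This is either blk0 or blk1.
--     """
--     ans = []
--     if cyclic:
--         if fill_on_edge:
--             marker = offset - blk1 // 2
--         else:
--             marker = offset - sp_edge // 2
--     else:
--         marker = offset
--     cur_sum = 0
--     prev_sum = 1
--     for fill_idx in range(m):
--         # determine current fill length from cumulative modding result
--         if cur_sum <= prev_sum:
--             cur_len = blk1
--         else:
--             cur_len = blk0
--
--         cur_sp = sp_edge if fill_idx == 0 else sp
--         # record fill/space interval
--         if invert:
--             if fill_on_edge:
--                 ans.append((marker + cur_len, marker + cur_sp + cur_len))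
--             else:
--                 ans.append((marker, marker + cur_sp))
--         else:
--             if fill_on_edge:
--                 ans.append((marker, marker + cur_len))
--             else:
--                 ans.append((marker + cur_sp, marker + cur_sp + cur_len))
--
--         marker += cur_len + cur_sp
--         prev_sum = cur_sum
--         cur_sum = (cur_sum + k) % m
--
--     # add middle fill or space
--     if mid_blk_len >= 0:
--         # fill in middle
--         if invert:
--             if not fill_on_edge:
--                 # we have one more space block before reaching middle block
--                 cur_sp = sp_edge if m == 0 else sp
--                 ans.append((marker, marker + cur_sp))
--             half_len = len(ans)
--         else:
--             # we don't want to replicate middle fill, so get half length now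
--             half_len = len(ans)
--             if fill_on_edge:
--                 ans.append((marker, marker + mid_blk_len))
--             else:
--                 cur_sp = sp_edge if m == 0 else sp
--                 ans.append((marker + cur_sp, marker + cur_sp + mid_blk_len))
--     else:
--         # space in middle
--         if invert:
--             if fill_on_edge:
--                 # the last space we added is wrong, we need to remove
--                 del ans[-1]
--                 marker -= sp
--             # we don't want to replicate middle space, so get half length now
--             half_len = len(ans)
--             ans.append((marker, marker + mid_sp_len))
--         else:
--             # don't need to do anything if we're recording blocks
--             half_len = len(ans)
--
--     # now add the second half of the list
--     shift = tot_area + offset * 2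
--     for idx in range(half_len - 1, -1, -1):
--         start, stop = ans[idx]
--         ans.append((shift - stop, shift - start))
--
--     return ans, num_diff_sp
-- ===== SOURCE B (Python) =====
-- def _fill_symmetric_interval(tot_area, sp, num_diff_sp, sp_edge, blk0, blk1, k, m, mid_blk_len, mid_sp_len,
--                              fill_on_edge, cyclic, offset=0, invert=False):
--     # Boundary-list construction: flatten the layout into an alternating list of segment
--     # lengths, prefix-sum it into absolute boundary coordinates, then pair up adjacent
--     # boundaries of the wanted parity (fill vs space) -- no running marker / mod state.
--     if cyclic:
--         start = offset - (blk1 // 2 if fill_on_edge else sp_edge // 2)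
--     else:
--         start = offset
--     segs = []
--     for i in range(m):
--         blk = blk1 if (i * k) % m <= ((i - 1) * k) % m else blk0
--         gap = sp_edge if i == 0 else sp
--         segs += [blk, gap] if fill_on_edge else [gap, blk]
--     bnd = [start]
--     for seg in segs:
--         bnd.append(bnd[-1] + seg)
--     p = 1 if fill_on_edge == invert else 0
--     half = [(bnd[2 * i + p], bnd[2 * i + p + 1]) for i in range(m)]
--     end = bnd[-1]
--     # middle entries: 'half' gets mirrored, 'mids' does not
--     mids = []
--     if mid_blk_len >= 0:
--         if invert:
--             if not fill_on_edge:
--                 gap = sp_edge if m == 0 else sp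
--                 half.append((end, end + gap))
--         elif fill_on_edge:
--             mids = [(end, end + mid_blk_len)]
--         else:
--             gap = sp_edge if m == 0 else sp
--             mids = [(end + gap, end + gap + mid_blk_len)]
--     elif invert:
--         if fill_on_edge:
--             half.pop()
--             end -= sp
--         mids = [(end, end + mid_sp_len)]
--     shift = tot_area + 2 * offset
--     return half + mids + [(shift - b, shift - a) for a, b in reversed(half)], num_diff_sp
-- ===== Notes on version B (the rewrite author's own statement) =====
-- stated objective: alternative
-- what changed: B abandons A's single stateful loop (running marker + cur_sum/prev_sum mod accumulator appending finished intervals) for a staged boundary-list construction: it flattens the layout into an alternating list of segment lengths, prefix-sums it into absolute boundary coordinates, then pairs adjacent boundaries of the parity selected by fill_on_edge/invert, and finally mirrors the first half by a reversed map instead of a descending index loop.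
import Mathlib
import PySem

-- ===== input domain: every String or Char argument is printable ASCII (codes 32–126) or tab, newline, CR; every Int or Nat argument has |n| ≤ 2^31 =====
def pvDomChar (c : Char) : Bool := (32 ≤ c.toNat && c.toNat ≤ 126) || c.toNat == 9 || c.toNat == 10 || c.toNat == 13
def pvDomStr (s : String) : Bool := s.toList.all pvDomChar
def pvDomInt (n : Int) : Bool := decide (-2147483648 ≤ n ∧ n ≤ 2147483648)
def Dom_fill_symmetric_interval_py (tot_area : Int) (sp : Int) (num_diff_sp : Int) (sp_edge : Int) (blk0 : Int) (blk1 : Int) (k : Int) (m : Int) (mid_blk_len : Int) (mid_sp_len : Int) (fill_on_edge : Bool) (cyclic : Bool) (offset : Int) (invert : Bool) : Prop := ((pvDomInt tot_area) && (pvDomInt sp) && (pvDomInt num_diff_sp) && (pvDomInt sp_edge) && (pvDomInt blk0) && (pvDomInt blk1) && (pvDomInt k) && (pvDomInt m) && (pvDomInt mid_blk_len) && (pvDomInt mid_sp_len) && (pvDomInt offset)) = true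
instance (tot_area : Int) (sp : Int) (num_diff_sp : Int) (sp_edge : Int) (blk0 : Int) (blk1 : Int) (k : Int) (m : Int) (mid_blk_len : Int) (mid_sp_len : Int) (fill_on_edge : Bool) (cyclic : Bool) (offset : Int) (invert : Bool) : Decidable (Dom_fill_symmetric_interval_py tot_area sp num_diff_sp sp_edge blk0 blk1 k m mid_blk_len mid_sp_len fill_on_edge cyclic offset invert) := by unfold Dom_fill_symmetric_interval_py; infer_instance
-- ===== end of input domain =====

-- B replaces A's single stateful loop (running marker + cur_sum/prev_sum accumulator) by a staged
-- boundary-list construction: segment lengths, prefix-summed boundaries, parity pairing, mirrored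
-- by a reversed map (objective: alternative).

-- ===== PORT A =====
-- body of A's second loop: append the mirror of ans[idx] (idx always valid)
def pvMirrorStep (shift : Int) (acc : List (Int × Int)) (idx : Int) : List (Int × Int) :=
  match PySem.List.pyGet? acc idx with
  | some p => acc ++ [(shift - p.2, shift - p.1)]
  | none => acc
-- one iteration of A's first loop; state = (ans, marker, cur_sum, prev_sum)
def pvAStep (sp sp_edge blk0 blk1 k m : Int) (foe inv : Bool)
    (st : List (Int × Int) × Int × Int × Int) (fill_idx : Int) :
    List (Int × Int) × Int × Int × Int :=
  match st with
  | (ans, marker, cur_sum, prev_sum) =>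
    let cur_len := if cur_sum ≤ prev_sum then blk1 else blk0
    let cur_sp := if fill_idx = 0 then sp_edge else sp
    let ans' :=
      if inv then
        if foe then ans ++ [(marker + cur_len, marker + cur_sp + cur_len)]
        else ans ++ [(marker, marker + cur_sp)]
      else
        if foe then ans ++ [(marker, marker + cur_len)]
        else ans ++ [(marker + cur_sp, marker + cur_sp + cur_len)]
    (ans', marker + cur_len + cur_sp, PySem.Int.mod (cur_sum + k) m, cur_sum)

def fill_symmetric_interval_py (tot_area : Int) (sp : Int) (num_diff_sp : Int) (sp_edge : Int) (blk0 : Int) (blk1 : Int) (k : Int) (m : Int) (mid_blk_len : Int) (mid_sp_len : Int) (fill_on_edge : Bool) (cyclic : Bool) (offset : Int) (invert : Bool) : (List (Int × Int)) × Int :=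
  let marker0 : Int :=
    if cyclic then
      if fill_on_edge then offset - PySem.Int.floordiv blk1 2
      else offset - PySem.Int.floordiv sp_edge 2
    else offset
  let st := (PySem.List.pyRange 0 m 1).foldl
      (pvAStep sp sp_edge blk0 blk1 k m fill_on_edge invert)
      (([] : List (Int × Int)), marker0, (0 : Int), (1 : Int))
  let ans := st.1
  let marker := st.2.1
  -- middle fill or space; result = (ans, marker, half_len)
  let amh : List (Int × Int) × Int × Int :=
    if mid_blk_len ≥ 0 then
      if invert then
        let ans' :=
          if fill_on_edge then ans
          else ans ++ [(marker, marker + (if m = 0 then sp_edge else sp))]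
        (ans', marker, (ans'.length : Int))
      else
        if fill_on_edge then (ans ++ [(marker, marker + mid_blk_len)], marker, (ans.length : Int))
        else
          let cur_sp := if m = 0 then sp_edge else sp
          (ans ++ [(marker + cur_sp, marker + cur_sp + mid_blk_len)], marker, (ans.length : Int))
    else
      if invert then
        -- 'del ans[-1]' raises IndexError on an empty ans (m ≤ 0); excluded by Pre_
        let ans' := if fill_on_edge then ans.dropLast else ans
        let marker' := if fill_on_edge then marker - sp else marker
        (ans' ++ [(marker', marker' + mid_sp_len)], marker', (ans'.length : Int))
      else (ans, marker, (ans.length : Int))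
  let ans2 := amh.1
  let half_len := amh.2.2
  let shift := tot_area + offset * 2
  -- second loop: for idx in range(half_len-1, -1, -1): append mirrored ans2[idx]
  let final := (PySem.List.pyRange (half_len - 1) (-1) (-1)).foldl
      (pvMirrorStep shift)   -- unreachable: idx is always a valid index
      ans2
  (final, num_diff_sp)

-- ===== PORT B =====
-- one iteration of B's segs loop: append this index's (block, gap) lengths in layout order
def pvSegStep (sp sp_edge blk0 blk1 k m : Int) (foe : Bool) (acc : List Int) (i : Int) : List Int :=
  let blk := if PySem.Int.mod (i * k) m ≤ PySem.Int.mod ((i - 1) * k) m then blk1 else blk0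
  let gap := if i = 0 then sp_edge else sp
  acc ++ (if foe then [blk, gap] else [gap, blk])
-- B's prefix-sum step: bnd.append(bnd[-1] + seg); bnd is always nonempty
def pvBndStep (b : List Int) (s : Int) : List Int :=
  b ++ [PySem.List.pyGetD b (-1) 0 + s]

def fill_symmetric_interval_py_alt (tot_area : Int) (sp : Int) (num_diff_sp : Int) (sp_edge : Int) (blk0 : Int) (blk1 : Int) (k : Int) (m : Int) (mid_blk_len : Int) (mid_sp_len : Int) (fill_on_edge : Bool) (cyclic : Bool) (offset : Int) (invert : Bool) : (List (Int × Int)) × Int :=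
  let start : Int :=
    if cyclic then offset - (if fill_on_edge then PySem.Int.floordiv blk1 2 else PySem.Int.floordiv sp_edge 2)
    else offset
  let segs := (PySem.List.pyRange 0 m 1).foldl (pvSegStep sp sp_edge blk0 blk1 k m fill_on_edge) []
  let bnd := segs.foldl pvBndStep [start]
  let p : Int := if fill_on_edge == invert then 1 else 0
  -- pair up the boundaries of the selected parity; indices are always in range
  let half := (PySem.List.pyRange 0 m 1).map
      (fun i => (PySem.List.pyGetD bnd (2 * i + p) 0, PySem.List.pyGetD bnd (2 * i + p + 1) 0))
  let endv := PySem.List.pyGetD bnd (-1) 0   -- bnd[-1]; bnd is nonempty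
  -- middle entries: (half', mids): half' gets mirrored, mids does not
  let hm : List (Int × Int) × List (Int × Int) :=
    if mid_blk_len ≥ 0 then
      if invert then
        ((if fill_on_edge then half
          else half ++ [(endv, endv + (if m = 0 then sp_edge else sp))]), [])
      else
        if fill_on_edge then (half, [(endv, endv + mid_blk_len)])
        else
          let gap := if m = 0 then sp_edge else sp
          (half, [(endv + gap, endv + gap + mid_blk_len)])
    else
      if invert then
        -- 'half.pop()' raises IndexError on an empty half (m ≤ 0); excluded by Pre_
        if fill_on_edge then (half.dropLast, [(endv - sp, endv - sp + mid_sp_len)])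
        else (half, [(endv, endv + mid_sp_len)])
      else (half, [])
  let half2 := hm.1
  let mids := hm.2
  let shift := tot_area + 2 * offset
  (half2 ++ mids ++ half2.reverse.map (fun q => (shift - q.2, shift - q.1)), num_diff_sp)

-- ===== PRECONDITION & SPEC =====
-- Pre_ excludes exactly the inputs on which Python A raises IndexError ('del ans[-1]' on an
-- empty list: middle space, invert, fill_on_edge and no half fill blocks); Python B raises there too.
def Pre_fill_symmetric_interval_py (tot_area : Int) (sp : Int) (num_diff_sp : Int) (sp_edge : Int) (blk0 : Int) (blk1 : Int) (k : Int) (m : Int) (mid_blk_len : Int) (mid_sp_len : Int) (fill_on_edge : Bool) (cyclic : Bool) (offset : Int) (invert : Bool) : Prop :=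
  ¬ (mid_blk_len < 0 ∧ invert = true ∧ fill_on_edge = true ∧ m ≤ 0)
instance (tot_area : Int) (sp : Int) (num_diff_sp : Int) (sp_edge : Int) (blk0 : Int) (blk1 : Int) (k : Int) (m : Int) (mid_blk_len : Int) (mid_sp_len : Int) (fill_on_edge : Bool) (cyclic : Bool) (offset : Int) (invert : Bool) : Decidable (Pre_fill_symmetric_interval_py tot_area sp num_diff_sp sp_edge blk0 blk1 k m mid_blk_len mid_sp_len fill_on_edge cyclic offset invert) := by unfold Pre_fill_symmetric_interval_py; infer_instance

def pvWitness_fill_symmetric_interval_py : Int × Int × Int × Int × Int × Int × Int × Int × Int × Int × Bool × Bool × Int × Bool :=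
  (12, 1, 0, 1, 2, 3, 1, 2, 2, 1, false, false, 0, false)

def Spec_fill_symmetric_interval_py (tot_area : Int) (sp : Int) (num_diff_sp : Int) (sp_edge : Int) (blk0 : Int) (blk1 : Int) (k : Int) (m : Int) (mid_blk_len : Int) (mid_sp_len : Int) (fill_on_edge : Bool) (cyclic : Bool) (offset : Int) (invert : Bool) (out : (List (Int × Int)) × Int) : Prop := out = fill_symmetric_interval_py_alt tot_area sp num_diff_sp sp_edge blk0 blk1 k m mid_blk_len mid_sp_len fill_on_edge cyclic offset invert
instance (tot_area : Int) (sp : Int) (num_diff_sp : Int) (sp_edge : Int) (blk0 : Int) (blk1 : Int) (k : Int) (m : Int) (mid_blk_len : Int) (mid_sp_len : Int) (fill_on_edge : Bool) (cyclic : Bool) (offset : Int) (invert : Bool) (out : (List (Int × Int)) × Int) : Decidable (Spec_fill_symmetric_interval_py tot_area sp num_diff_sp sp_edge blk0 blk1 k m mid_blk_len mid_sp_len fill_on_edge cyclic offset invert out) := by unfold Spec_fill_symmetric_interval_py; infer_instance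

-- ===== CLAIM (what is proved, stated in full; the proofs are below) =====
def Claim_equal_fill_symmetric_interval_py : Prop := ∀ (tot_area : Int) (sp : Int) (num_diff_sp : Int) (sp_edge : Int) (blk0 : Int) (blk1 : Int) (k : Int) (m : Int) (mid_blk_len : Int) (mid_sp_len : Int) (fill_on_edge : Bool) (cyclic : Bool) (offset : Int) (invert : Bool), Dom_fill_symmetric_interval_py tot_area sp num_diff_sp sp_edge blk0 blk1 k m mid_blk_len mid_sp_len fill_on_edge cyclic offset invert → Pre_fill_symmetric_interval_py tot_area sp num_diff_sp sp_edge blk0 blk1 k m mid_blk_len mid_sp_len fill_on_edge cyclic offset invert → Spec_fill_symmetric_interval_py tot_area sp num_diff_sp sp_edge blk0 blk1 k m mid_blk_len mid_sp_len fill_on_edge cyclic offset invert (fill_symmetric_interval_py tot_area sp num_diff_sp sp_edge blk0 blk1 k m mid_blk_len mid_sp_len fill_on_edge cyclic offset invert)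

-- ===== LEMMAS AND PROOFS =====

-- proof-only intermediate: a one-pass fold producing (intervals, marker); both ports reduce to it
def pvBStep (sp sp_edge blk0 blk1 k m : Int) (foe inv : Bool)
    (st : List (Int × Int) × Int) (i : Int) : List (Int × Int) × Int :=
  match st with
  | (half, marker) =>
    let cur_len := if PySem.Int.mod (i * k) m ≤ PySem.Int.mod ((i - 1) * k) m then blk1 else blk0
    let cur_sp := if i = 0 then sp_edge else sp
    let lo := marker + (if inv && foe then cur_len else if !inv && !foe then cur_sp else 0)
    (half ++ [(lo, lo + (if inv then cur_sp else cur_len))], marker + cur_len + cur_sp)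

-- mod of an already-reduced value
theorem pvModMod (m x c : Int) (hm : 0 < m) :
    PySem.Int.mod (PySem.Int.mod x m + c) m = PySem.Int.mod (x + c) m := by
  rw [PySem.Int.mod_eq_emod_of_pos hm, PySem.Int.mod_eq_emod_of_pos hm,
      PySem.Int.mod_eq_emod_of_pos hm]
  have h : x % m + c = (x + c) + m * (-(x / m)) := by rw [Int.emod_def]; ring
  rw [h, Int.add_mul_emod_self_left]

theorem pvModZero (k m : Int) (hm : 0 < m) : PySem.Int.mod (0 * k) m = 0 := by
  rw [PySem.Int.mod_eq_emod_of_pos hm]; simp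

-- A's loop agrees with the fold step by step: (cur_sum, prev_sum) is ((a*k)%m, ((a-1)*k)%m)
theorem pvLoopAux (sp sp_edge blk0 blk1 k m : Int) (foe inv : Bool) (hm : 0 < m) :
    ∀ (n : ℕ) (a : Int), 0 ≤ a → a + (n : Int) = m →
    ∀ (ans : List (Int × Int)) (marker : Int),
      (PySem.List.pyRange a m 1).foldl (pvAStep sp sp_edge blk0 blk1 k m foe inv)
        (ans, marker, PySem.Int.mod (a * k) m,
          if a = 0 then 1 else PySem.Int.mod ((a - 1) * k) m)
      = (((PySem.List.pyRange a m 1).foldl (pvBStep sp sp_edge blk0 blk1 k m foe inv) (ans, marker)).1,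
         ((PySem.List.pyRange a m 1).foldl (pvBStep sp sp_edge blk0 blk1 k m foe inv) (ans, marker)).2,
         PySem.Int.mod (m * k) m, PySem.Int.mod ((m - 1) * k) m) := by
  intro n
  induction n with
  | zero =>
    intro a ha0 ham ans marker
    have hae : a = m := by omega
    subst hae
    rw [PySem.List.pyRange_one_eq_nil (le_refl a)]
    simp only [List.foldl_nil]
    have : a ≠ 0 := by omega
    simp [this]
  | succ n ih =>
    intro a ha0 ham ans marker
    have hlt : a < m := by push_cast at ham; omega
    rw [PySem.List.pyRange_one_cons hlt]
    simp only [List.foldl_cons]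
    have hlen : (if PySem.Int.mod (a * k) m ≤
          (if a = 0 then 1 else PySem.Int.mod ((a - 1) * k) m) then blk1 else blk0)
        = (if PySem.Int.mod (a * k) m ≤ PySem.Int.mod ((a - 1) * k) m then blk1 else blk0) := by
      by_cases haz : a = 0
      · subst haz
        rw [if_pos rfl, if_pos, if_pos]
        · have h1 : 0 ≤ PySem.Int.mod ((0 - 1) * k) m := PySem.Int.mod_nonneg _ hm
          rw [pvModZero k m hm]; omega
        · rw [pvModZero k m hm]; omega
      · rw [if_neg haz]
    have hstep : pvAStep sp sp_edge blk0 blk1 k m foe inv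
        (ans, marker, PySem.Int.mod (a * k) m,
          if a = 0 then 1 else PySem.Int.mod ((a - 1) * k) m) a
        = ((pvBStep sp sp_edge blk0 blk1 k m foe inv (ans, marker) a).1,
           (pvBStep sp sp_edge blk0 blk1 k m foe inv (ans, marker) a).2,
           PySem.Int.mod ((a + 1) * k) m,
           if a + 1 = 0 then 1 else PySem.Int.mod ((a + 1 - 1) * k) m) := by
      have hnz : a + 1 ≠ 0 := by omega
      simp only [pvAStep, pvBStep, hnz, if_false]
      rw [hlen, pvModMod _ _ _ hm]
      rw [show a * k + k = (a + 1) * k by ring, show a + 1 - 1 = a by ring]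
      generalize (if PySem.Int.mod (a * k) m ≤ PySem.Int.mod ((a - 1) * k) m then blk1 else blk0) = C
      generalize (if a = 0 then sp_edge else sp) = S
      cases inv <;> cases foe <;>
        simp only [Bool.and_self, Bool.and_false, Bool.false_and, Bool.true_and,
          Bool.not_true, Bool.not_false, if_true, if_false, cond_true, cond_false,
          Bool.true_and, ite_true, ite_false] <;>
        refine Prod.ext ?_ (Prod.ext ?_ rfl) <;>
        simp [Prod.ext_iff] <;> omega
    rw [hstep]
    exact ih (a + 1) (by omega) (by push_cast; push_cast at ham; omega)
      (pvBStep sp sp_edge blk0 blk1 k m foe inv (ans, marker) a).1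
      (pvBStep sp sp_edge blk0 blk1 k m foe inv (ans, marker) a).2

-- full first-loop equivalence from the initial state, componentwise
theorem pvLoopEq (sp sp_edge blk0 blk1 k m : Int) (foe inv : Bool) (marker : Int) :
    ((PySem.List.pyRange 0 m 1).foldl (pvAStep sp sp_edge blk0 blk1 k m foe inv)
        (([] : List (Int × Int)), marker, (0 : Int), (1 : Int))).1
      = ((PySem.List.pyRange 0 m 1).foldl (pvBStep sp sp_edge blk0 blk1 k m foe inv)
          (([] : List (Int × Int)), marker)).1
    ∧ ((PySem.List.pyRange 0 m 1).foldl (pvAStep sp sp_edge blk0 blk1 k m foe inv)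
        (([] : List (Int × Int)), marker, (0 : Int), (1 : Int))).2.1
      = ((PySem.List.pyRange 0 m 1).foldl (pvBStep sp sp_edge blk0 blk1 k m foe inv)
          (([] : List (Int × Int)), marker)).2 := by
  by_cases hm : 0 < m
  · have h := pvLoopAux sp sp_edge blk0 blk1 k m foe inv hm m.toNat 0 (le_refl 0)
      (by omega) [] marker
    rw [pvModZero k m hm] at h
    rw [if_pos rfl] at h
    rw [h]
    exact ⟨rfl, rfl⟩
  · rw [PySem.List.pyRange_one_eq_nil (by omega)]
    simp

-- pyGetD into a prefix of an appended list
theorem pvGetDAppend (xs ts : List Int) (j : Int) (h0 : 0 ≤ j) (h : j < xs.length) :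
    PySem.List.pyGetD (xs ++ ts) j 0 = PySem.List.pyGetD xs j 0 := by
  rw [PySem.List.pyGetD_eq_getElem (xs ++ ts) 0 h0 (by simp; omega),
      PySem.List.pyGetD_eq_getElem xs 0 h0 h]
  exact List.getElem_append_left (by omega)

-- reading the three boundaries appended after an even-length prefix
theorem pvGetD0 (ys : List Int) (n : Nat) (hys : ys.length = 2 * n) (a b c : Int) :
    PySem.List.pyGetD (ys ++ [a, b, c]) (2 * (n : Int)) 0 = a := by
  rw [show (2 * (n : Int)) = ((2 * n : Nat) : Int) by push_cast; ring,
      PySem.List.pyGetD_natCast]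
  simp [List.getD, hys]
theorem pvGetD1 (ys : List Int) (n : Nat) (hys : ys.length = 2 * n) (a b c : Int) :
    PySem.List.pyGetD (ys ++ [a, b, c]) (2 * (n : Int) + 1) 0 = b := by
  rw [show (2 * (n : Int) + 1) = ((2 * n + 1 : Nat) : Int) by push_cast; ring,
      PySem.List.pyGetD_natCast]
  simp [List.getD, hys]
theorem pvGetD2 (ys : List Int) (n : Nat) (hys : ys.length = 2 * n) (a b c : Int) :
    PySem.List.pyGetD (ys ++ [a, b, c]) (2 * (n : Int) + 1 + 1) 0 = c := by
  rw [show (2 * (n : Int) + 1 + 1) = ((2 * n + 2 : Nat) : Int) by push_cast; ring,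
      PySem.List.pyGetD_natCast]
  simp [List.getD, hys]
theorem pvGetD2' (ys : List Int) (n : Nat) (hys : ys.length = 2 * n) (a b c : Int) :
    PySem.List.pyGetD (ys ++ [a, b, c]) (2 * (n : Int) + 2) 0 = c := by
  rw [show (2 * (n : Int) + 2) = ((2 * n + 2 : Nat) : Int) by push_cast; ring,
      PySem.List.pyGetD_natCast]
  simp [List.getD, hys]

-- B's staged construction (segs → boundaries → parity pairs, end boundary) equals the fold
theorem pvStagedAux (sp sp_edge blk0 blk1 k m start : Int) (foe inv : Bool) :
    ∀ (n : ℕ),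
    ∃ (ys : List Int) (v : Int),
      (((PySem.List.pyRange 0 (n : Int) 1).foldl (pvSegStep sp sp_edge blk0 blk1 k m foe) []).foldl
          pvBndStep [start]) = ys ++ [v]
      ∧ ys.length = 2 * n
      ∧ v = ((PySem.List.pyRange 0 (n : Int) 1).foldl (pvBStep sp sp_edge blk0 blk1 k m foe inv)
          (([] : List (Int × Int)), start)).2
      ∧ (PySem.List.pyRange 0 (n : Int) 1).map
          (fun i => (PySem.List.pyGetD (ys ++ [v]) (2 * i + (if foe == inv then 1 else 0)) 0,
            PySem.List.pyGetD (ys ++ [v]) (2 * i + (if foe == inv then 1 else 0) + 1) 0))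
        = ((PySem.List.pyRange 0 (n : Int) 1).foldl (pvBStep sp sp_edge blk0 blk1 k m foe inv)
            (([] : List (Int × Int)), start)).1 := by
  intro n
  induction n with
  | zero =>
    refine ⟨[], start, ?_, ?_, ?_, ?_⟩ <;>
      simp [PySem.List.pyRange_one_eq_nil (le_refl (0 : Int))]
  | succ n ih =>
    obtain ⟨ys, v, hB, hlen, hv, hmap⟩ := ih
    have hrange : PySem.List.pyRange 0 ((n : Int) + 1) 1
        = PySem.List.pyRange 0 (n : Int) 1 ++ [(n : Int)] :=
      PySem.List.pyRange_one_succ_right (by positivity)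
    have hcast : ((n + 1 : ℕ) : Int) = (n : Int) + 1 := by push_cast; ring
    set CL := (if PySem.Int.mod ((n : Int) * k) m ≤ PySem.Int.mod (((n : Int) - 1) * k) m
        then blk1 else blk0) with hCL
    set SP := (if (n : Int) = 0 then sp_edge else sp) with hSP
    have hsegstep : ∀ acc, pvSegStep sp sp_edge blk0 blk1 k m foe acc (n : Int)
        = acc ++ (if foe then [CL, SP] else [SP, CL]) := by
      intro acc; simp [pvSegStep, hCL, hSP]
    -- the two new segment lengths in layout order
    set s1 := (if foe then CL else SP) with hs1
    set s2 := (if foe then SP else CL) with hs2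
    have hpair : (if foe then [CL, SP] else [SP, CL]) = [s1, s2] := by cases foe <;> simp [hs1, hs2]
    have hBsucc :
        (((PySem.List.pyRange 0 ((n + 1 : ℕ) : Int) 1).foldl
            (pvSegStep sp sp_edge blk0 blk1 k m foe) []).foldl pvBndStep [start])
        = (ys ++ [v] ++ [v + s1]) ++ [v + s1 + s2] := by
      rw [hcast, hrange, List.foldl_append, List.foldl_cons, List.foldl_nil, hsegstep,
          hpair, List.foldl_append, hB]
      simp only [List.foldl_cons, List.foldl_nil, pvBndStep,
        PySem.List.pyGetD_neg_one_append_singleton]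
    have hFsucc :
        ((PySem.List.pyRange 0 ((n + 1 : ℕ) : Int) 1).foldl
            (pvBStep sp sp_edge blk0 blk1 k m foe inv) (([] : List (Int × Int)), start))
        = pvBStep sp sp_edge blk0 blk1 k m foe inv
            ((PySem.List.pyRange 0 (n : Int) 1).foldl
              (pvBStep sp sp_edge blk0 blk1 k m foe inv) (([] : List (Int × Int)), start)) (n : Int) := by
      rw [hcast, hrange, List.foldl_append, List.foldl_cons, List.foldl_nil]
    refine ⟨ys ++ [v] ++ [v + s1], v + s1 + s2, hBsucc, by simp [hlen]; omega, ?_, ?_⟩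
    · -- new end boundary = fold's new marker
      rw [hFsucc]
      simp only [pvBStep, ← hCL, ← hSP]
      rw [← hv]
      cases foe <;> simp [hs1, hs2] <;> ring
    · -- parity pairs over range (n+1)
      rw [hcast, hrange, List.map_append, List.foldl_append, List.foldl_cons, List.foldl_nil]
      have hnewlist : (ys ++ [v] ++ [v + s1]) ++ [v + s1 + s2]
          = (ys ++ [v]) ++ [v + s1, v + s1 + s2] := by simp
      -- old indices unchanged under the two appended boundaries
      have hmap' : (PySem.List.pyRange 0 (n : Int) 1).map
          (fun i => (PySem.List.pyGetD ((ys ++ [v] ++ [v + s1]) ++ [v + s1 + s2])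
              (2 * i + (if foe == inv then 1 else 0)) 0,
            PySem.List.pyGetD ((ys ++ [v] ++ [v + s1]) ++ [v + s1 + s2])
              (2 * i + (if foe == inv then 1 else 0) + 1) 0))
          = (PySem.List.pyRange 0 (n : Int) 1).map
          (fun i => (PySem.List.pyGetD (ys ++ [v]) (2 * i + (if foe == inv then 1 else 0)) 0,
            PySem.List.pyGetD (ys ++ [v]) (2 * i + (if foe == inv then 1 else 0) + 1) 0)) := by
        refine List.map_congr_left ?_
        intro i hi
        rw [PySem.List.mem_pyRange_one] at hi
        have hlen2 : ((ys ++ [v]).length : Int) = 2 * (n : Int) + 1 := by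
          simp [hlen]
        have hp01 : (0 : Int) ≤ (if foe == inv then 1 else 0) ∧
            (if foe == inv then (1 : Int) else 0) ≤ 1 := by split <;> omega
        rw [hnewlist,
            pvGetDAppend (ys ++ [v]) [v + s1, v + s1 + s2]
              (2 * i + (if foe == inv then 1 else 0)) (by omega) (by omega),
            pvGetDAppend (ys ++ [v]) [v + s1, v + s1 + s2]
              (2 * i + (if foe == inv then 1 else 0) + 1) (by omega) (by omega)]
      rw [hmap', hmap]
      -- the new pair at index n
      have hflat : ((ys ++ [v] ++ [v + s1]) ++ [v + s1 + s2]) = ys ++ [v, v + s1, v + s1 + s2] := by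
        simp
      congr 1
      cases foe <;> cases inv <;>
        simp [pvBStep, hflat, hs1, hs2, hCL, hSP, ← hv, Prod.ext_iff,
          pvGetD0 ys n hlen, pvGetD1 ys n hlen, pvGetD2 ys n hlen, pvGetD2' ys n hlen] <;>
        ring_nf
-- wrapper: for any Int m, B's staged half and end equal the fold's list and marker
theorem pvStagedEq (sp sp_edge blk0 blk1 k m start : Int) (foe inv : Bool) :
    ((PySem.List.pyRange 0 m 1).map
        (fun i => (PySem.List.pyGetD
            (((PySem.List.pyRange 0 m 1).foldl (pvSegStep sp sp_edge blk0 blk1 k m foe) []).foldl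
              pvBndStep [start]) (2 * i + (if foe == inv then 1 else 0)) 0,
          PySem.List.pyGetD
            (((PySem.List.pyRange 0 m 1).foldl (pvSegStep sp sp_edge blk0 blk1 k m foe) []).foldl
              pvBndStep [start]) (2 * i + (if foe == inv then 1 else 0) + 1) 0))
      = ((PySem.List.pyRange 0 m 1).foldl (pvBStep sp sp_edge blk0 blk1 k m foe inv)
          (([] : List (Int × Int)), start)).1)
    ∧ (PySem.List.pyGetD
        (((PySem.List.pyRange 0 m 1).foldl (pvSegStep sp sp_edge blk0 blk1 k m foe) []).foldl
          pvBndStep [start]) (-1) 0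
      = ((PySem.List.pyRange 0 m 1).foldl (pvBStep sp sp_edge blk0 blk1 k m foe inv)
          (([] : List (Int × Int)), start)).2) := by
  by_cases hm : 0 ≤ m
  · obtain ⟨ys, v, hB, _, hv, hmap⟩ := pvStagedAux sp sp_edge blk0 blk1 k m start foe inv m.toNat
    rw [show ((m.toNat : ℕ) : Int) = m by omega] at hB hv hmap
    rw [hB]
    exact ⟨hmap, by rw [PySem.List.pyGetD_neg_one_append_singleton]; exact hv⟩
  · rw [PySem.List.pyRange_one_eq_nil (by omega)]
    refine ⟨by simp, ?_⟩
    have h := PySem.List.pyGetD_neg_one_append_singleton ([] : List Int) start 0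
    simpa using h

-- the descending-index mirror loop is a reversed map over the untouched prefix
theorem pvMirror (shift : Int) :
    ∀ (j : ℕ) (base extra : List (Int × Int)), j ≤ base.length →
      (PySem.List.pyRange ((j : Int) - 1) (-1) (-1)).foldl
        (pvMirrorStep shift)
        (base ++ extra)
      = base ++ extra ++ ((base.take j).reverse.map (fun p => (shift - p.2, shift - p.1))) := by
  intro j
  induction j with
  | zero =>
    intro base extra _
    rw [show ((0 : ℕ) : Int) - 1 = -1 by norm_num,
        PySem.List.pyRange_neg_one_eq_nil (le_refl _)]
    simp
  | succ j ih =>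
    intro base extra hj
    have hjl : j < base.length := by omega
    rw [show ((j + 1 : ℕ) : Int) - 1 = (j : Int) by push_cast; ring,
        PySem.List.pyRange_neg_one_cons (by omega)]
    simp only [List.foldl_cons]
    have hget : PySem.List.pyGet? (base ++ extra) (j : Int) = some base[j] := by
      rw [PySem.List.pyGet?_natCast, List.getElem?_append_left hjl]
      exact List.getElem?_eq_getElem hjl
    simp only [pvMirrorStep, hget]
    have hrw : (base ++ extra ++ [(shift - base[j].2, shift - base[j].1)])
        = base ++ (extra ++ [(shift - base[j].2, shift - base[j].1)]) := by
      simp [List.append_assoc]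
    rw [hrw, ih base (extra ++ [(shift - base[j].2, shift - base[j].1)]) (by omega)]
    have htake : (base.take (j + 1)).reverse = base[j] :: (base.take j).reverse := by
      rw [List.take_succ, List.getElem?_eq_getElem hjl]
      simp
    rw [htake]
    simp [List.append_assoc]

-- start line half_len-1 with half_len = length of the prefix to mirror
theorem pvMirrorFull (shift : Int) (base extra : List (Int × Int)) :
    (PySem.List.pyRange (((base.length : ℕ) : Int) - 1) (-1) (-1)).foldl
        (pvMirrorStep shift)
        (base ++ extra)
      = base ++ extra ++ (base.reverse.map (fun p => (shift - p.2, shift - p.1))) := by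
  have := pvMirror shift base.length base extra (le_refl _)
  rwa [List.take_length] at this

theorem pvMirrorNil (shift : Int) (base : List (Int × Int)) :
    (PySem.List.pyRange (((base.length : ℕ) : Int) - 1) (-1) (-1)).foldl
        (pvMirrorStep shift)
        base
      = base ++ ([] : List (Int × Int)) ++ (base.reverse.map (fun p => (shift - p.2, shift - p.1))) := by
  have := pvMirrorFull shift base []
  simpa using this

-- ===== VERDICT (by name: the statement is the Claim_ definition above) =====
theorem fill_symmetric_interval_py_spec : Claim_equal_fill_symmetric_interval_py := by
  intro tot_area sp num_diff_sp sp_edge blk0 blk1 k m mid_blk_len mid_sp_len foe cyc offset inv _hDom hPre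
  unfold Spec_fill_symmetric_interval_py
  have hmk : (if cyc then
        if foe then offset - PySem.Int.floordiv blk1 2
        else offset - PySem.Int.floordiv sp_edge 2
      else offset)
      = (if cyc then
          offset - (if foe then PySem.Int.floordiv blk1 2 else PySem.Int.floordiv sp_edge 2)
        else offset) := by
    cases cyc <;> cases foe <;> simp
  simp only [fill_symmetric_interval_py, fill_symmetric_interval_py_alt]
  rw [hmk]
  rw [(pvLoopEq sp sp_edge blk0 blk1 k m foe inv _).1, (pvLoopEq sp sp_edge blk0 blk1 k m foe inv _).2]
  rw [(pvStagedEq sp sp_edge blk0 blk1 k m _ foe inv).1, (pvStagedEq sp sp_edge blk0 blk1 k m _ foe inv).2]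
  rw [show tot_area + offset * 2 = tot_area + 2 * offset by ring]
  set L := ((PySem.List.pyRange 0 m 1).foldl (pvBStep sp sp_edge blk0 blk1 k m foe inv)
      (([] : List (Int × Int)),
        if cyc then offset - (if foe then PySem.Int.floordiv blk1 2 else PySem.Int.floordiv sp_edge 2)
        else offset)).1 with hL
  set M := ((PySem.List.pyRange 0 m 1).foldl (pvBStep sp sp_edge blk0 blk1 k m foe inv)
      (([] : List (Int × Int)),
        if cyc then offset - (if foe then PySem.Int.floordiv blk1 2 else PySem.Int.floordiv sp_edge 2)
        else offset)).2 with hM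
  by_cases hmid : mid_blk_len ≥ 0 <;> cases inv <;> cases foe <;>
    simp only [hmid, if_true, if_false, ite_true, ite_false, Bool.false_eq_true, Bool.true_eq_false] <;>
    (simp only [pvMirrorFull, pvMirrorNil]; try simp [List.append_assoc])
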